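-- pv_equiv track=rewrite | github.com/JunzhongLin/leetcode_practice | daily_exercise/766. Toeplitz Matrix_easy.py | isToeplitzMatrix_recur
-- ===== SOURCE A (Python) =====
-- from typing import List
--
-- def isToeplitzMatrix_recur(matrix: List[List[int]]) -> bool:
--
--     def helper(sub_matrix):
--         if len(sub_matrix) == 1 or len(sub_matrix[0]) == 1:
--             return True
--
--         m, n = len(sub_matrix), len(sub_matrix[0])
--
--         if helper([row[:-1] for row in sub_matrix[:-1]]):
--             for i in range(1, n):
--                 if sub_matrix[m - 1][i] != sub_matrix[m - 2][i - 1]: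
--                     return False
--             for j in range(1, m):
--                 if sub_matrix[j][n - 1] != sub_matrix[j - 1][n - 2]:
--                     return False
--             return True
--
--         return False
--
--     return helper(matrix)
-- ===== SOURCE B (Python) =====
-- from typing import List
--
-- def isToeplitzMatrix_recur(matrix: List[List[int]]) -> bool:
--     # Single pass: a matrix is Toeplitz iff every row, minus its last element,
--     # equals the next row minus its first element.
--     return all(a[:-1] == b[1:] for a, b in zip(matrix, matrix[1:]))
-- ===== Notes on version B (the rewrite author's own statement) =====
-- stated objective: faster
-- what changed: Replaced the recursive peel-off-the-last-row-and-column scheme (which re-copies the whole matrix at every level) by a single pass comparing each row shifted by one against the next row.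
-- outside the precondition, e.g. on isToeplitzMatrix_recur([[1, 2], [3, 1, 5]]): A returns True, B returns False
import Mathlib
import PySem

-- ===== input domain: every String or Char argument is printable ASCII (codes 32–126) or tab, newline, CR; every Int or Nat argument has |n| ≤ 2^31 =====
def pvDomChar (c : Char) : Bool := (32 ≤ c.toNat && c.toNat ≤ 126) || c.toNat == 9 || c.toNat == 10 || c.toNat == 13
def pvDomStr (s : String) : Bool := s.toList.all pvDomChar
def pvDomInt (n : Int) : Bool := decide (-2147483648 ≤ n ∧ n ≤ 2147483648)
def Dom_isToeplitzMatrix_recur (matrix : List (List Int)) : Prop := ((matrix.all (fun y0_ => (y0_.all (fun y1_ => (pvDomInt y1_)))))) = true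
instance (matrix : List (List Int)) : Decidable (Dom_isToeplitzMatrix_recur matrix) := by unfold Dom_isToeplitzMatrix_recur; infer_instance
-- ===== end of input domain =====

-- B replaces A's recursion (peel off the last row and column, re-copying the whole
-- matrix at every level) by a single pass comparing each row minus its last element
-- with the next row minus its first element.

-- ===== PORT A =====
-- literal port of the inner `helper` (Python's locals m, n are inlined); the
-- `.length = 0` guard only totalises the recursion (Python raises IndexError there;
-- such inputs lie outside Pre_).
def pvHelperA (mat : List (List Int)) : Bool :=
  if mat.length = 0 then false
  else if mat.length = 1 ∨ (mat.headD []).length = 1 then true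
  else
    if pvHelperA ((mat.dropLast).map (fun r => r.dropLast)) then
      ((List.range' 1 ((mat.headD []).length - 1)).all fun i =>
        ((mat.getD (mat.length - 1) []).getD i 0 ==
         (mat.getD (mat.length - 2) []).getD (i - 1) 0)) &&
      ((List.range' 1 (mat.length - 1)).all fun j =>
        ((mat.getD j []).getD ((mat.headD []).length - 1) 0 ==
         (mat.getD (j - 1) []).getD ((mat.headD []).length - 2) 0))
    else false
termination_by mat.length
decreasing_by simp [List.length_map, List.length_dropLast]; omega

def isToeplitzMatrix_recur (matrix : List (List Int)) : Bool := pvHelperA matrix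

-- ===== PORT B =====
def isToeplitzMatrix_recur_alt (matrix : List (List Int)) : Bool :=
  (matrix.zip (matrix.drop 1)).all (fun p => p.1.dropLast == p.2.drop 1)

-- ===== PRECONDITION & SPEC =====
-- Pre_ excludes the inputs on which A raises IndexError (the empty matrix, a matrix
-- of ≥ 2 empty rows, and most ragged matrices) and the remaining ragged matrices,
-- on which A's returned value is an accident of its last-row/last-column indexing;
-- the Toeplitz question is only posed for rectangular matrices.
def Pre_isToeplitzMatrix_recur (matrix : List (List Int)) : Prop :=
  matrix ≠ [] ∧ (∀ r ∈ matrix, r.length = (matrix.headD []).length) ∧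
    (matrix.length = 1 ∨ (matrix.headD []).length ≠ 0)
instance (matrix : List (List Int)) : Decidable (Pre_isToeplitzMatrix_recur matrix) := by
  unfold Pre_isToeplitzMatrix_recur; infer_instance

def pvWitness_isToeplitzMatrix_recur : List (List Int) := [[1, 2, 3], [4, 1, 2], [5, 4, 1]]

def Spec_isToeplitzMatrix_recur (matrix : List (List Int)) (out : Bool) : Prop := out = isToeplitzMatrix_recur_alt matrix
instance (matrix : List (List Int)) (out : Bool) : Decidable (Spec_isToeplitzMatrix_recur matrix out) := by unfold Spec_isToeplitzMatrix_recur; infer_instance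

-- ===== CLAIM (what is proved, stated in full; the proofs are below) =====
def Claim_equal_isToeplitzMatrix_recur : Prop := ∀ (matrix : List (List Int)), Dom_isToeplitzMatrix_recur matrix → Pre_isToeplitzMatrix_recur matrix → Spec_isToeplitzMatrix_recur matrix (isToeplitzMatrix_recur matrix)

-- ===== LEMMAS AND PROOFS =====

-- the common characterisation: every entry equals its upper-left neighbour
def pvToep (mat : List (List Int)) : Prop :=
  ∀ i j, i + 1 < mat.length → j + 1 < (mat.headD []).length →
    (mat.getD (i + 1) []).getD (j + 1) 0 = (mat.getD i []).getD j 0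

theorem pv_zip_all_iff (l : List (List Int)) (p : List Int × List Int → Bool) :
    (l.zip (l.drop 1)).all p = true ↔
      ∀ i, i + 1 < l.length → p (l.getD i [], l.getD (i+1) []) = true := by
  induction l with
  | nil => simp
  | cons a t ih =>
    cases t with
    | nil => simp
    | cons b t' =>
      simp only [List.drop_succ_cons, List.drop_zero, List.zip_cons_cons, List.all_cons,
        Bool.and_eq_true, List.length_cons] at *
      constructor
      · rintro ⟨hp, hrest⟩ i hi
        cases i with
        | zero => simpa using hp
        | succ i => simpa using (ih.mp hrest) i (by omega)
      · intro h
        refine ⟨by simpa using h 0 (by omega), ih.mpr ?_⟩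
        intro i hi
        simpa using h (i+1) (by omega)

theorem pv_pair_iff (a b : List Int) (n : Nat) (ha : a.length = n) (hb : b.length = n) :
    (a.dropLast == b.drop 1) = true ↔
      ∀ j, j + 1 < n → b.getD (j+1) 0 = a.getD j 0 := by
  rw [beq_iff_eq]
  constructor
  · intro h j hj
    have h1 : a.dropLast[j]'(by simp [ha]; omega) =
        (b.drop 1)[j]'(by simp [hb]; omega) := List.getElem_of_eq h _
    rw [List.getElem_dropLast, List.getElem_drop] at h1
    rw [List.getD_eq_getElem _ _ (by omega), List.getD_eq_getElem _ _ (by omega)]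
    rw [h1]; congr 1; omega
  · intro h
    apply List.ext_getElem (by simp [ha, hb])
    intro i h1 h2
    rw [List.getElem_dropLast, List.getElem_drop]
    have hi : i + 1 < n := by simp [ha] at h1; omega
    have := h i hi
    rw [List.getD_eq_getElem _ _ (by omega), List.getD_eq_getElem _ _ (by omega)] at this
    rw [← this]; congr 1; omega

theorem pv_headD_eq_getD (l : List (List Int)) : l.headD [] = l.getD 0 [] := by
  cases l <;> rfl

theorem pv_row_len (mat : List (List Int))
    (hrect : ∀ r ∈ mat, r.length = (mat.headD []).length)
    (k : Nat) (hk : k < mat.length) :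
    (mat.getD k []).length = (mat.headD []).length := by
  rw [List.getD_eq_getElem _ _ hk]
  exact hrect _ (List.getElem_mem hk)

theorem pv_getD_map_dropLast (mat : List (List Int)) (i : Nat) (h : i + 1 < mat.length) :
    ((mat.dropLast).map (fun r => r.dropLast)).getD i [] = (mat.getD i []).dropLast := by
  rw [List.getD_eq_getElem _ _ (by simp; omega), List.getD_eq_getElem _ _ (by omega)]
  rw [List.getElem_map, List.getElem_dropLast]

theorem pv_getD_dropLast_int (l : List Int) (j : Nat) (h : j + 1 < l.length) :
    l.dropLast.getD j 0 = l.getD j 0 := by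
  rw [List.getD_eq_getElem _ _ (by simp; omega), List.getD_eq_getElem _ _ (by omega),
    List.getElem_dropLast]

theorem pv_b_iff (mat : List (List Int))
    (hrect : ∀ r ∈ mat, r.length = (mat.headD []).length) :
    isToeplitzMatrix_recur_alt mat = true ↔ pvToep mat := by
  unfold isToeplitzMatrix_recur_alt
  rw [pv_zip_all_iff]
  constructor
  · intro h i j hi hj
    have hp := h i hi
    rw [pv_pair_iff _ _ ((mat.headD []).length)
      (pv_row_len mat hrect i (by omega)) (pv_row_len mat hrect (i+1) (by omega))] at hp
    exact hp j hj
  · intro h i hi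
    rw [pv_pair_iff _ _ ((mat.headD []).length)
      (pv_row_len mat hrect i (by omega)) (pv_row_len mat hrect (i+1) (by omega))]
    intro j hj
    exact h i j hi hj

theorem pv_a_iff (mat : List (List Int)) (hne : mat ≠ [])
    (hrect : ∀ r ∈ mat, r.length = (mat.headD []).length)
    (hw : mat.length = 1 ∨ (mat.headD []).length ≠ 0) :
    pvHelperA mat = true ↔ pvToep mat := by
  rw [pvHelperA]
  have hm0 : mat.length ≠ 0 := by simpa using hne
  rw [if_neg hm0]
  by_cases hbase : mat.length = 1 ∨ (mat.headD []).length = 1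
  · rw [if_pos hbase]
    constructor
    · intro _ i j hi hj
      exfalso; rcases hbase with h | h <;> omega
    · intro _; rfl
  · rw [if_neg hbase]
    rw [not_or] at hbase
    obtain ⟨hb1, hb2⟩ := hbase
    have hm2 : 2 ≤ mat.length := by omega
    have hn2 : 2 ≤ (mat.headD []).length := by
      rcases hw with h | h
      · omega
      · omega
    -- facts about the peeled sub-matrix
    have hsublen : ((mat.dropLast).map (fun r => r.dropLast)).length = mat.length - 1 := by
      simp
    have hsubhead : (((mat.dropLast).map (fun r => r.dropLast)).headD []).length
        = (mat.headD []).length - 1 := by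
      rw [pv_headD_eq_getD, pv_getD_map_dropLast mat 0 (by omega)]
      rw [List.length_dropLast, ← pv_headD_eq_getD]
    have hsubne : (mat.dropLast).map (fun r => r.dropLast) ≠ [] := by
      intro h
      rw [← List.length_eq_zero_iff] at h
      omega
    have hsubrect : ∀ r ∈ (mat.dropLast).map (fun r => r.dropLast),
        r.length = (((mat.dropLast).map (fun r => r.dropLast)).headD []).length := by
      intro r hr
      rw [hsubhead]
      obtain ⟨r', hr', rfl⟩ := List.mem_map.mp hr
      have : r' ∈ mat := List.dropLast_subset _ hr'
      rw [List.length_dropLast, hrect _ this]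
    have ih := pv_a_iff ((mat.dropLast).map (fun r => r.dropLast)) hsubne hsubrect
      (Or.inr (by omega))
    -- transfer of sub-matrix entries to matrix entries
    have hsubget : ∀ k j, k < mat.length - 1 → j < (mat.headD []).length - 1 →
        (((mat.dropLast).map (fun r => r.dropLast)).getD k []).getD j 0
          = (mat.getD k []).getD j 0 := by
      intro k j hk hj
      rw [pv_getD_map_dropLast mat k (by omega)]
      exact pv_getD_dropLast_int _ _ (by rw [pv_row_len mat hrect k (by omega)]; omega)
    have hsubToep : pvToep ((mat.dropLast).map (fun r => r.dropLast)) ↔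
        (∀ i j, i + 1 < mat.length - 1 → j + 1 < (mat.headD []).length - 1 →
          (mat.getD (i + 1) []).getD (j + 1) 0 = (mat.getD i []).getD j 0) := by
      unfold pvToep
      rw [hsublen, hsubhead]
      constructor
      · intro h i j hi hj
        have := h i j hi hj
        rwa [hsubget _ _ (by omega) (by omega), hsubget _ _ (by omega) (by omega)] at this
      · intro h i j hi hj
        rw [hsubget _ _ (by omega) (by omega), hsubget _ _ (by omega) (by omega)]
        exact h i j hi hj
    cases hsub : pvHelperA ((mat.dropLast).map (fun r => r.dropLast)) with
    | false =>
      simp only [Bool.false_eq_true, if_false, false_iff]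
      intro ht
      have hT : pvHelperA ((mat.dropLast).map (fun r => r.dropLast)) = true :=
        ih.mpr (hsubToep.mpr (fun i j hi hj => ht i j (by omega) (by omega)))
      rw [hsub] at hT
      exact Bool.false_ne_true hT
    | true =>
      rw [if_pos rfl]
      have hsT : ∀ i j, i + 1 < mat.length - 1 → j + 1 < (mat.headD []).length - 1 →
          (mat.getD (i + 1) []).getD (j + 1) 0 = (mat.getD i []).getD j 0 :=
        hsubToep.mp (ih.mp hsub)
      rw [Bool.and_eq_true, List.all_eq_true, List.all_eq_true]
      constructor
      · rintro ⟨h1, h2⟩ i j hi hj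
        by_cases hie : i + 1 = mat.length - 1
        · have hm := h1 (j+1) (by rw [List.mem_range'_1]; omega)
          rw [beq_iff_eq] at hm
          rw [show mat.length - 1 = i + 1 by omega, show mat.length - 2 = i by omega,
            show j + 1 - 1 = j by omega] at hm
          exact hm
        · by_cases hje : j + 1 = (mat.headD []).length - 1
          · have hm := h2 (i+1) (by rw [List.mem_range'_1]; omega)
            rw [beq_iff_eq] at hm
            rw [show (mat.headD []).length - 1 = j + 1 by omega,
              show (mat.headD []).length - 2 = j by omega,
              show i + 1 - 1 = i by omega] at hm
            exact hm
          · exact hsT i j (by omega) (by omega)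
      · intro ht
        constructor
        · intro i hi
          rw [List.mem_range'_1] at hi
          rw [beq_iff_eq]
          have h := ht (mat.length - 2) (i - 1) (by omega) (by omega)
          rw [show mat.length - 2 + 1 = mat.length - 1 by omega,
            show i - 1 + 1 = i by omega] at h
          exact h
        · intro j hj
          rw [List.mem_range'_1] at hj
          rw [beq_iff_eq]
          have h := ht (j - 1) ((mat.headD []).length - 2) (by omega) (by omega)
          rw [show j - 1 + 1 = j by omega,
            show (mat.headD []).length - 2 + 1 = (mat.headD []).length - 1 by omega] at h
          exact h
termination_by mat.length
decreasing_by simp; omega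

-- ===== VERDICT (by name: the statement is the Claim_ definition above) =====
theorem isToeplitzMatrix_recur_spec : Claim_equal_isToeplitzMatrix_recur := by
  intro mat _ hpre
  unfold Spec_isToeplitzMatrix_recur isToeplitzMatrix_recur
  obtain ⟨hne, hrect, hw⟩ := hpre
  have h := (pv_a_iff mat hne hrect hw).trans (pv_b_iff mat hrect).symm
  rcases h1 : pvHelperA mat <;> rcases h2 : isToeplitzMatrix_recur_alt mat <;> simp_all
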